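-- pv_equiv track=rewrite | github.com/soyoon26/BAEKJOON | S5 15235.Olympiad Pizza.py | pizza
-- ===== SOURCE A (Python) =====
-- from collections import deque
--
-- def pizza(pizzas):
--     n = len(pizzas)
--     times = [0] * n
--     queue = deque((i, pizzas[i]) for i in range(n))
--     time = 0
--     while queue:
--         time += 1
--         idx, remaining_pizza = queue.popleft()
--         remaining_pizza -= 1
--         if remaining_pizza == 0:
--             times[idx] = time
--         else:
--             queue.append((idx, remaining_pizza))
--     return times
-- ===== SOURCE B (Python) =====
-- def pizza(pizzas):
--     # Closed form: person i finishes at time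
--     #   sum_j min(p_j, p_i - 1)  (slices served in everyone's first p_i - 1 rounds)
--     # + #{j <= i : p_j >= p_i}   (slices served in round p_i up to and including i)
--     res = []
--     for i, p in enumerate(pizzas):
--         total = 0
--         for q in pizzas:
--             total += min(q, p - 1)
--         ahead = 0
--         for q in pizzas[: i + 1]:
--             if q >= p:
--                 ahead += 1
--         res.append(total + ahead)
--     return res
-- ===== Notes on version B (the rewrite author's own statement) =====
-- stated objective: alternative
-- what changed: replaces the round-robin queue simulation (one step per slice) with a direct closed-form formula: finish[i] = sum_j min(p_j, p_i - 1) + #{j <= i : p_j >= p_i}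
import Mathlib
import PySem

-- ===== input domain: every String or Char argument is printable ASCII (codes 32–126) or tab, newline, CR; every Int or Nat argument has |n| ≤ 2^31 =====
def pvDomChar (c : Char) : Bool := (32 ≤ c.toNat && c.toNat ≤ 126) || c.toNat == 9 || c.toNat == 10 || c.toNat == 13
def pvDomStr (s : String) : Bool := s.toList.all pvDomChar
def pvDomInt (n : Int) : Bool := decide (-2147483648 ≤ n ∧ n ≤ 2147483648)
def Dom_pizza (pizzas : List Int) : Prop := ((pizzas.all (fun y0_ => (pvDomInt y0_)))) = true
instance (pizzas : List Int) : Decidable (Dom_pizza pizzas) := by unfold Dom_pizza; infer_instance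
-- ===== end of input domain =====

-- B replaces A's per-slice round-robin queue simulation with the closed-form finish time
-- finish[i] = Σ_j min(p_j, p_i − 1) + #{j ≤ i : p_j ≥ p_i}.

-- ===== PORT A =====
-- Fuel for the while loop: the total number of pops; under Pre_pizza (all entries ≥ 1)
-- it is exactly the number of iterations the Python loop performs.
def pizzaFuel : List (Int × Int) → Nat
  | [] => 0
  | e :: q => e.2.toNat + pizzaFuel q

def pizzaLoop (fuel : Nat) (queue : List (Int × Int)) (times : List Int) (time : Int) :
    List Int :=
  match fuel, queue with
  | 0, _ => times
  | _ + 1, [] => times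
  | fuel + 1, (idx, remaining) :: qs =>
    let time' := time + 1
    let remaining' := remaining - 1
    if remaining' = 0 then pizzaLoop fuel qs (times.set idx.toNat time') time'
    else pizzaLoop fuel (qs ++ [(idx, remaining')]) times time'

def pizza (pizzas : List Int) : List Int :=
  let n := pizzas.length
  let times : List Int := List.replicate n 0
  let queue := (PySem.List.pyRange 0 (n : Int)).map (fun i => (i, PySem.List.pyGetD pizzas i 0))
  pizzaLoop (pizzaFuel queue) queue times 0

-- ===== PORT B =====
def pizza_alt (pizzas : List Int) : List Int :=
  (PySem.List.enumerate pizzas).foldl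
    (fun res ip =>
      let total := pizzas.foldl (fun a q => a + min q (ip.2 - 1)) 0
      let ahead := (PySem.List.slice pizzas none (some (ip.1 + 1))).foldl
        (fun a q => if ip.2 ≤ q then a + 1 else a) 0
      res ++ [total + ahead]) []

-- ===== PRECONDITION & SPEC =====
-- Pre_ excludes exactly the lists containing an entry ≤ 0: on those A's while loop never
-- terminates (the entry's remaining count skips 0 and decreases forever), so A returns nothing.
def Pre_pizza (pizzas : List Int) : Prop := ∀ p ∈ pizzas, 1 ≤ p
instance (pizzas : List Int) : Decidable (Pre_pizza pizzas) := by unfold Pre_pizza; infer_instance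
def pvWitness_pizza : List Int := [2, 1, 3]

def Spec_pizza (pizzas : List Int) (out : List Int) : Prop := out = pizza_alt pizzas
instance (pizzas : List Int) (out : List Int) : Decidable (Spec_pizza pizzas out) := by unfold Spec_pizza; infer_instance

-- ===== CLAIM (what is proved, stated in full; the proofs are below) =====
def Claim_equal_pizza : Prop := ∀ (pizzas : List Int), Dom_pizza pizzas → Pre_pizza pizzas → Spec_pizza pizzas (pizza pizzas)

-- ===== LEMMAS AND PROOFS =====

-- Σ_{(i,r) ∈ q} min(r, c)
def sumMin (q : List (Int × Int)) (c : Int) : Int := (q.map (fun e => min e.2 c)).sum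
-- #{(i,r) ∈ q : v ≤ r}
def cntGe (q : List (Int × Int)) (v : Int) : Int := (q.countP (fun e => v ≤ e.2) : Int)

-- the closed-form finish value of a queue entry with remaining count r, where `pref` is the
-- queue prefix up to and including the entry itself, `q0` the whole queue, `t` the elapsed time
def entryVal (q0 : List (Int × Int)) (t : Int) (pref : List (Int × Int)) (r : Int) : Int :=
  t + sumMin q0 (r - 1) + cntGe pref r

-- write every entry's closed-form value into `times`, left to right
def applySpec (q0 : List (Int × Int)) (t : Int) :
    List (Int × Int) → List (Int × Int) → List Int → List Int
  | _, [], times => times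
  | pref, (i, r) :: rest, times =>
    applySpec q0 t (pref ++ [(i, r)]) rest
      (times.set i.toNat (entryVal q0 t (pref ++ [(i, r)]) r))

lemma sumMin_cons (e : Int × Int) (q : List (Int × Int)) (c : Int) :
    sumMin (e :: q) c = min e.2 c + sumMin q c := by
  simp [sumMin]

lemma sumMin_append (q p : List (Int × Int)) (c : Int) :
    sumMin (q ++ p) c = sumMin q c + sumMin p c := by
  simp [sumMin]

lemma cntGe_cons (e : Int × Int) (q : List (Int × Int)) (v : Int) :
    cntGe (e :: q) v = (if v ≤ e.2 then 1 else 0) + cntGe q v := by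
  unfold cntGe
  rw [List.countP_cons]
  by_cases h : v ≤ e.2 <;> simp [h] <;> push_cast <;> ring

lemma cntGe_append (q p : List (Int × Int)) (v : Int) :
    cntGe (q ++ p) v = cntGe q v + cntGe p v := by
  simp [cntGe, List.countP_append]

lemma sumMin_zero (q : List (Int × Int)) (h : ∀ e ∈ q, 1 ≤ e.2) : sumMin q 0 = 0 := by
  induction q with
  | nil => simp [sumMin]
  | cons e q ih =>
    rw [sumMin_cons, ih (fun x hx => h x (List.mem_cons_of_mem _ hx))]
    have := h e List.mem_cons_self
    omega

-- Σ min(r, c) − Σ min(r, c−1) = #{r ≥ c}, pointwise min(x,c) = min(x,c−1) + [c ≤ x]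
lemma sumMin_pred (q : List (Int × Int)) (c : Int) :
    sumMin q c = sumMin q (c - 1) + cntGe q c := by
  induction q with
  | nil => simp [sumMin, cntGe]
  | cons e q ih =>
    rw [sumMin_cons, sumMin_cons, cntGe_cons, ih]
    have : min e.2 c = min e.2 (c - 1) + (if c ≤ e.2 then 1 else 0) := by
      simp [min_def]; split_ifs <;> omega
    omega

-- applySpec only writes at the indices of its `rest` argument
lemma applySpec_set (q0 : List (Int × Int)) (t : Int) :
    ∀ (rest pref : List (Int × Int)) (times : List Int) (i : Nat) (v : Int),
    (∀ e ∈ rest, e.1.toNat ≠ i) →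
    applySpec q0 t pref rest (times.set i v) = (applySpec q0 t pref rest times).set i v := by
  intro rest
  induction rest with
  | nil => intro pref times i v _; rfl
  | cons e rest ih =>
    intro pref times i v h
    obtain ⟨j, r⟩ := e
    have hj : j.toNat ≠ i := h (j, r) List.mem_cons_self
    simp only [applySpec]
    rw [List.set_comm _ _ hj.symm,
      ih _ _ _ _ (fun x hx => h x (List.mem_cons_of_mem _ hx))]

-- congruence: two applySpec runs agree if the per-entry values agree
lemma applySpec_congr (q0 q1 : List (Int × Int)) (t0 t1 : Int) :
    ∀ (rest p0 p1 : List (Int × Int)) (times : List Int),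
    (∀ i r, (i, r) ∈ rest → ∀ p' : List (Int × Int),
      entryVal q0 t0 (p0 ++ (p' ++ [(i, r)])) r = entryVal q1 t1 (p1 ++ (p' ++ [(i, r)])) r) →
    applySpec q0 t0 p0 rest times = applySpec q1 t1 p1 rest times := by
  intro rest
  induction rest with
  | nil => intro p0 p1 times _; rfl
  | cons e rest ih =>
    intro p0 p1 times h
    obtain ⟨i, r⟩ := e
    simp only [applySpec]
    have hhead := h i r List.mem_cons_self []
    simp only [List.nil_append] at hhead
    rw [hhead]
    apply ih
    intro j s hs p'
    have := h j s (List.mem_cons_of_mem _ hs) ((i, r) :: p')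
    simpa [List.append_assoc] using this

-- composition: processing a ++ b = processing a, then b with the grown prefix
lemma applySpec_append (q0 : List (Int × Int)) (t : Int) :
    ∀ (a b pref : List (Int × Int)) (times : List Int),
    applySpec q0 t pref (a ++ b) times
      = applySpec q0 t (pref ++ a) b (applySpec q0 t pref a times) := by
  intro a
  induction a with
  | nil => intro b pref times; simp [applySpec]
  | cons e a ih =>
    intro b pref times
    obtain ⟨i, r⟩ := e
    simp only [List.cons_append, applySpec]
    rw [ih, List.append_assoc]
    rfl

-- step lemma, finished head: popping (i,1) writes t+1 at i and leaves the rest unchanged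
lemma applySpec_step_done (i : Int) (qs : List (Int × Int)) (t : Int) (times : List Int)
    (hq : ∀ e ∈ qs, 1 ≤ e.2) :
    applySpec ((i, 1) :: qs) t [] ((i, 1) :: qs) times
      = applySpec qs (t + 1) [] qs (times.set i.toNat (t + 1)) := by
  simp only [applySpec, List.nil_append]
  have hv : entryVal ((i, 1) :: qs) t [(i, 1)] 1 = t + 1 := by
    simp [entryVal, sumMin_cons, sumMin_zero qs hq, cntGe]
  rw [hv]
  apply applySpec_congr
  intro j s hs p'
  have hs1 : 1 ≤ s := hq (j, s) hs
  simp only [entryVal, List.nil_append, sumMin_cons, List.cons_append, cntGe_cons]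
  have h1 : min (1 : Int) (s - 1) + (if s ≤ 1 then (1 : Int) else 0) = 1 := by
    simp [min_def]; split_ifs <;> omega
  omega

-- step lemma, unfinished head: popping (i,r), r ≥ 2, re-queues (i, r−1) at the back
lemma applySpec_step_rot (i r : Int) (qs : List (Int × Int)) (t : Int) (times : List Int) (hi : ∀ e ∈ qs, e.1.toNat ≠ i.toNat) :
    applySpec ((i, r) :: qs) t [] ((i, r) :: qs) times
      = applySpec (qs ++ [(i, r - 1)]) (t + 1) [] (qs ++ [(i, r - 1)]) times := by
  simp only [applySpec, List.nil_append]
  rw [applySpec_set _ _ _ _ _ _ _ hi, applySpec_append]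
  simp only [applySpec, List.nil_append]
  have hvals : applySpec ((i, r) :: qs) t [(i, r)] qs times
      = applySpec (qs ++ [(i, r - 1)]) (t + 1) [] qs times := by
    apply applySpec_congr
    intro j s _ p'
    simp only [entryVal, List.nil_append, List.singleton_append, sumMin_cons, sumMin_append,
      cntGe_cons]
    have hnil : sumMin ([] : List (Int × Int)) (s - 1) = 0 := by simp [sumMin]
    have : min r (s - 1) + (if s ≤ r then (1 : Int) else 0)
        = min (r - 1) (s - 1) + 1 := by
      simp [min_def]; split_ifs <;> omega
    omega
  rw [hvals]
  congr 1
  · -- the head's value: written first on the left, last on the right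
    simp only [entryVal, sumMin_cons, sumMin_append, cntGe_append]
    have hnil : sumMin ([] : List (Int × Int)) (r - 1 - 1) = 0 := by simp [sumMin]
    have h2 : cntGe ([(i, r)] : List (Int × Int)) r = 1 := by simp [cntGe]
    have h3 : cntGe ([(i, r - 1)] : List (Int × Int)) (r - 1) = 1 := by simp [cntGe]
    have hs := sumMin_pred qs (r - 1)
    have h4 : min r (r - 1) = r - 1 := by omega
    have h5 : min (r - 1) (r - 1 - 1) = r - 1 - 1 := by omega
    rw [h2, h3]
    omega

-- the main loop invariant: with enough fuel the simulation computes the closed-form values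
lemma pizzaLoop_eq : ∀ (fuel : Nat) (q : List (Int × Int)) (times : List Int) (t : Int),
    (∀ e ∈ q, 1 ≤ e.2) → (q.map (fun e => e.1.toNat)).Nodup → pizzaFuel q ≤ fuel →
    pizzaLoop fuel q times t = applySpec q t [] q times := by
  intro fuel
  induction fuel with
  | zero =>
    intro q times t hq _ hf
    cases q with
    | nil => rfl
    | cons e q =>
      exfalso
      have := hq e List.mem_cons_self
      simp [pizzaFuel] at hf
      omega
  | succ fuel ih =>
    intro q times t hq hnd hf
    cases q with
    | nil => rfl
    | cons e qs =>
      obtain ⟨i, r⟩ := e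
      have hr1 : 1 ≤ r := hq (i, r) List.mem_cons_self
      have hqs : ∀ e ∈ qs, 1 ≤ e.2 := fun x hx => hq x (List.mem_cons_of_mem _ hx)
      simp only [pizzaFuel] at hf
      simp only [pizzaLoop]
      by_cases h1 : r - 1 = 0
      · have hr : r = 1 := by omega
        subst hr
        simp only [if_pos h1]
        rw [ih qs _ _ hqs (by simp only [List.map_cons, List.nodup_cons] at hnd; exact hnd.2) (by omega)]
        rw [applySpec_step_done i qs t times hqs]
      · have hr2 : 2 ≤ r := by omega
        simp only [if_neg h1]
        have hnd' : ((qs ++ [(i, r - 1)]).map (fun e => e.1.toNat)).Nodup := by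
          simp only [List.map_append, List.map_cons, List.map_nil] at hnd ⊢
          exact ((List.perm_append_singleton _ _).symm).nodup (by simpa using hnd)
        have hfq : pizzaFuel (qs ++ [(i, r - 1)]) ≤ fuel := by
          have : ∀ (l : List (Int × Int)) (e : Int × Int),
              pizzaFuel (l ++ [e]) = pizzaFuel l + e.2.toNat := by
            intro l e
            induction l with
            | nil => simp [pizzaFuel]
            | cons x l ihl => simp [pizzaFuel, ihl]; omega
          rw [this]
          simp only
          omega
        rw [ih _ _ _ (by
            intro x hx
            rcases List.mem_append.mp hx with h | h
            · exact hqs x h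
            · simp at h; subst h; simpa using (by omega : (1:Int) ≤ r - 1))
          hnd' hfq]
        rw [applySpec_step_rot i r qs t times (by
          intro x hx
          have hmem : x.1.toNat ∈ qs.map (fun e => e.1.toNat) := List.mem_map_of_mem hx
          simp only [List.map_cons, List.nodup_cons] at hnd
          intro hcontra
          exact hnd.1 (hcontra ▸ hmem))]

-- the per-position values produced by applySpec, as a list
def specVals (q0 : List (Int × Int)) (t : Int) :
    List (Int × Int) → List (Int × Int) → List Int
  | _, [] => []
  | pref, (i, r) :: rest =>
    entryVal q0 t (pref ++ [(i, r)]) r :: specVals q0 t (pref ++ [(i, r)]) rest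

-- applySpec on an enumerated suffix overwrites positions k .. k+len−1 with specVals
lemma applySpec_enum (q0 : List (Int × Int)) (t : Int) :
    ∀ (xs : List Int) (k : Nat) (pref : List (Int × Int)) (times : List Int),
    times.length = k + xs.length →
    applySpec q0 t pref (PySem.List.enumerate xs (k : Int)) times
      = times.take k ++ specVals q0 t pref (PySem.List.enumerate xs (k : Int)) := by
  intro xs
  induction xs with
  | nil =>
    intro k pref times hlen
    simp only [List.length_nil, Nat.add_zero] at hlen
    simp [PySem.List.enumerate, applySpec, specVals, List.take_of_length_le (le_of_eq hlen)]
  | cons x xs ih =>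
    intro k pref times hlen
    rw [PySem.List.enumerate_cons]
    have hcast : (k : Int) + 1 = ((k + 1 : Nat) : Int) := by push_cast; ring
    simp only [applySpec, specVals, Int.toNat_natCast]
    rw [hcast, ih (k + 1) _ _ (by simp only [List.length_set, List.length_cons] at hlen ⊢; omega)]
    have hk : k < times.length := by simp only [List.length_cons] at hlen; omega
    have hset : ∀ v : Int, (times.set k v).take (k + 1) = times.take k ++ [v] := by
      intro v
      rw [List.set_eq_take_cons_drop v hk, List.take_append]
      simp [List.length_take, Nat.min_eq_left (le_of_lt hk), List.take_succ_cons]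
    rw [hset]
    simp

lemma specVals_eq (q0 : List (Int × Int)) (t : Int) (pizzas : List Int) :
    ∀ (xs : List Int) (k : Nat) (pref : List (Int × Int)),
    pizzas.drop k = xs → pref.map (fun e => e.2) = pizzas.take k →
    specVals q0 t pref (PySem.List.enumerate xs (k : Int))
      = (PySem.List.enumerate xs (k : Int)).map
          (fun ip => t + sumMin q0 (ip.2 - 1)
            + ((pizzas.take (ip.1.toNat + 1)).countP (fun q => ip.2 ≤ q) : Int)) := by
  intro xs
  induction xs with
  | nil => intro k pref _ _; simp [PySem.List.enumerate, specVals]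
  | cons x xs ih =>
    intro k pref hdrop hpref
    rw [PySem.List.enumerate_cons]
    have hcast : (k : Int) + 1 = ((k + 1 : Nat) : Int) := by push_cast; ring
    simp only [specVals, List.map_cons, Int.toNat_natCast]
    have htake : pizzas.take (k + 1) = pizzas.take k ++ [x] := by
      rw [List.take_add, hdrop]
      rfl
    rw [List.cons_eq_cons]
    refine ⟨?_, ?_⟩
    · -- head value
      simp only [entryVal, cntGe, htake]
      have : (pref ++ [((k : Int), x)]).countP (fun e => decide (x ≤ e.2))
          = (pizzas.take k).countP (fun q => decide (x ≤ q))
            + ([x].countP (fun q => decide (x ≤ q))) := by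
        rw [List.countP_append, ← hpref, List.countP_map]
        simp [Function.comp_def]
      rw [this]
      push_cast
      simp [List.countP_append]
    · -- tail
      rw [hcast, ih (k + 1) _ (by
          have hdd : List.drop (k + 1) pizzas = (List.drop k pizzas).drop 1 := by
            rw [List.drop_drop]
          rw [hdd, hdrop]
          rfl)
        (by rw [htake, ← hpref]; simp)]

-- fst-indices of the initial queue are 0,…,n−1: nodup
lemma enum_fst_nodup (pizzas : List Int) :
    ((PySem.List.enumerate pizzas).map (fun e => e.1.toNat)).Nodup := by
  have hp := PySem.List.pairwise_lt_enumerate pizzas (0 : Int)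
  show ((PySem.List.enumerate pizzas).map (fun e => e.1.toNat)).Pairwise (· ≠ ·)
  rw [List.pairwise_map]
  refine List.Pairwise.imp_of_mem ?_ hp
  intro a b ha hb hlt
  rcases (PySem.List.mem_enumerate_iff _ _ _).mp ha with ⟨k, _, hak⟩
  rcases (PySem.List.mem_enumerate_iff _ _ _).mp hb with ⟨m, _, hbm⟩
  have h0a : 0 ≤ a.1 := by simp [hak]
  have h0b : 0 ≤ b.1 := by simp [hbm]
  simp only [ne_eq]
  omega

-- ===== VERDICT (by name: the statement is the Claim_ definition above) =====
theorem pizza_spec : Claim_equal_pizza := by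
  intro pizzas _ hpre
  simp only [Spec_pizza, pizza, pizza_alt]
  have hq : (PySem.List.pyRange 0 ((pizzas.length : Nat) : Int)).map
      (fun i => (i, PySem.List.pyGetD pizzas i 0)) = PySem.List.enumerate pizzas := by
    rw [PySem.List.enumerate_eq_map_pyRange pizzas 0]
    rfl
  rw [hq]
  have hall : ∀ e ∈ PySem.List.enumerate pizzas, 1 ≤ e.2 := by
    intro e he
    apply hpre
    rw [← PySem.List.map_snd_enumerate pizzas 0]
    exact List.mem_map_of_mem he
  rw [pizzaLoop_eq _ _ _ _ hall (enum_fst_nodup pizzas) le_rfl]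
  rw [show PySem.List.enumerate pizzas = PySem.List.enumerate pizzas ((0 : Nat) : Int) from by
    norm_num]
  rw [applySpec_enum _ _ pizzas 0 [] _ (by simp)]
  rw [specVals_eq _ _ pizzas pizzas 0 [] (by simp) (by simp)]
  rw [PySem.List.foldl_append_singleton_eq_map]
  simp only [List.take_zero, List.nil_append]
  have hsm : ∀ (s : Int) (c : Int), sumMin (PySem.List.enumerate pizzas s) c
      = (pizzas.map (fun q => min q c)).sum := by
    intro s c
    unfold sumMin
    rw [show (fun (e : Int × Int) => min e.2 c)
        = (fun q => min q c) ∘ (fun e : Int × Int => e.2) from rfl,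
      ← List.map_map, PySem.List.map_snd_enumerate]
  apply List.map_congr_left
  intro ip hip
  have hnn : 0 ≤ ip.1 := by
    rcases (PySem.List.mem_enumerate_iff _ _ _).mp hip with ⟨k, hk, hkeq⟩
    simp [hkeq]
  rw [PySem.List.foldl_add]
  have hslice : PySem.List.slice pizzas none (some (ip.1 + 1))
      = pizzas.take (ip.1.toNat + 1) := by
    rw [show ip.1 + 1 = ((ip.1.toNat + 1 : Nat) : Int) from by omega,
      PySem.List.slice_to_natCast]
  rw [hslice]
  rw [show (fun (a q : Int) => if ip.2 ≤ q then a + 1 else a)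
      = (fun (a q : Int) => if decide (ip.2 ≤ q) = true then a + 1 else a) from by
    funext a q; by_cases h : ip.2 ≤ q <;> simp [h]]
  rw [PySem.List.foldl_count_if, hsm]
  push_cast
  ring
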